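-- pv_equiv track=rewrite | github.com/romanrouvier/tactigon | .agents/skills/ingest-youtube/ingest.py | pick_lang
-- ===== SOURCE A (Python) =====
-- def pick_lang(prefs: list[str], manual: set[str], auto: set[str]) -> tuple[str, str] | None:
--     """Return (lang_code, source) where source is 'manual' or 'auto', or None."""
--     for code in prefs:
--         if code in manual:
--             return code, "manual"
--     for code in prefs:
--         if code in auto:
--             return code, "auto"
--     if manual:
--         return next(iter(sorted(manual))), "manual"
--     if auto:
--         return next(iter(sorted(auto))), "auto"
--     return None
-- ===== SOURCE B (Python) =====
-- def pick_lang(prefs: list[str], manual: set[str], auto: set[str]) -> tuple[str, str] | None: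
--     """Return (lang_code, source) where source is 'manual' or 'auto', or None."""
--     # Invert the problem: index prefs once by first-occurrence position, then pick,
--     # from each candidate set, the member with the smallest preference position.
--     pos = {}
--     for i, code in enumerate(prefs):
--         if code not in pos:
--             pos[code] = i
--     hit = min((c for c in manual if c in pos), key=pos.get, default=None)
--     if hit is not None:
--         return hit, "manual"
--     hit = min((c for c in auto if c in pos), key=pos.get, default=None)
--     if hit is not None:
--         return hit, "auto"
--     if manual:
--         return min(manual), "manual"
--     if auto:
--         return min(auto), "auto"
--     return None
-- ===== Notes on version B (the rewrite author's own statement) =====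
-- stated objective: alternative
-- what changed: Instead of scanning prefs twice and testing set membership per preference, B builds a first-occurrence position index of prefs once and selects from each candidate set the member with the minimal preference position (min with key), with min(set) replacing sorted(set)[0] in the fallback.
import Mathlib
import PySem

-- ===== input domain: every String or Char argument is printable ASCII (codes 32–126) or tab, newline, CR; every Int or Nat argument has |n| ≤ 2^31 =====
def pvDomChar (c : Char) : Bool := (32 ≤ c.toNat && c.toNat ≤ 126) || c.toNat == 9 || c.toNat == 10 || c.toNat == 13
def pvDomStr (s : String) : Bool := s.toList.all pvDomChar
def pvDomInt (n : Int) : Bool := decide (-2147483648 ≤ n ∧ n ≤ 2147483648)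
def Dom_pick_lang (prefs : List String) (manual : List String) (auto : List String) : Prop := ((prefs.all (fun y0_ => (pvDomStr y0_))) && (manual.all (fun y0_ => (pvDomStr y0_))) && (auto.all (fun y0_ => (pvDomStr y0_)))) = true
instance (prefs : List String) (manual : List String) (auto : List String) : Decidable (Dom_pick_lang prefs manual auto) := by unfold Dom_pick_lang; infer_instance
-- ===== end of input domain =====

-- B replaces A's two membership scans of prefs with a first-occurrence position index of prefs
-- and a minimal-position selection from each candidate set (alternative decomposition, similar cost).

-- ===== PORT A =====
-- `for code in prefs: if code in s: return code`, as a loop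
def pvFirstHit (prefs : List String) (s : PySem.Set String) : Option String :=
  match prefs with
  | [] => none
  | c :: rest => if c ∈ s then some c else pvFirstHit rest s

def pick_lang (prefs : List String) (manual : List String) (auto : List String) : Option (String × String) :=
  match pvFirstHit prefs manual with
  | some c => some (c, "manual")
  | none =>
    match pvFirstHit prefs auto with
    | some c => some (c, "auto")
    | none =>
      if manual ≠ [] then
        -- next(iter(sorted(manual)))
        match (PySem.List.sorted manual (fun x => x) false).head? with
        | some m => some (m, "manual")
        | none => none
      else if auto ≠ [] then
        match (PySem.List.sorted auto (fun x => x) false).head? with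
        | some m => some (m, "auto")
        | none => none
      else none

-- ===== PORT B =====
-- pos = {}; for i, code in enumerate(prefs): if code not in pos: pos[code] = i
def pvPosIndex (prefs : List String) : PySem.Dict String Int :=
  (PySem.List.enumerate prefs 0).foldl
    (fun (d : PySem.Dict String Int) p =>
      if d.contains p.2 then d else d.insert p.2 p.1)
    PySem.Dict.empty

def pick_lang_alt (prefs : List String) (manual : List String) (auto : List String) : Option (String × String) :=
  -- pos := pvPosIndex prefs
  -- min((c for c in cand if c in pos), key=pos.get, default=None); the key is injective
  -- on the candidate set, so the set's iteration order cannot affect the result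
  match PySem.List.min? (manual.filter (fun c => (pvPosIndex prefs).contains c)) (fun c => (pvPosIndex prefs).getD c 0) with
  | some c => some (c, "manual")
  | none =>
    match PySem.List.min? (auto.filter (fun c => (pvPosIndex prefs).contains c)) (fun c => (pvPosIndex prefs).getD c 0) with
    | some c => some (c, "auto")
    | none =>
      -- if manual: return min(manual), "manual"  (min of a set: order-independent)
      match PySem.List.min? manual (fun c => c) with
      | some m => some (m, "manual")
      | none =>
        match PySem.List.min? auto (fun c => c) with
        | some m => some (m, "auto")
        | none => none

-- ===== PRECONDITION & SPEC =====
def Spec_pick_lang (prefs : List String) (manual : List String) (auto : List String) (out : Option (String × String)) : Prop := out = pick_lang_alt prefs manual auto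
instance (prefs : List String) (manual : List String) (auto : List String) (out : Option (String × String)) : Decidable (Spec_pick_lang prefs manual auto out) := by unfold Spec_pick_lang; infer_instance

-- ===== CLAIM (what is proved, stated in full; the proofs are below) =====
def Claim_equal_pick_lang : Prop := ∀ (prefs : List String) (manual : List String) (auto : List String), Dom_pick_lang prefs manual auto → Spec_pick_lang prefs manual auto (pick_lang prefs manual auto)

-- ===== LEMMAS AND PROOFS =====

-- the position index records the FIRST occurrence index of each element of prefs
lemma pvPos_get?_aux (prefs : List String) (s : Int) (d : PySem.Dict String Int) (c : String) :
    ((PySem.List.enumerate prefs s).foldl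
      (fun (d : PySem.Dict String Int) p =>
        if d.contains p.2 then d else d.insert p.2 p.1) d).get? c
    = (match d.get? c with
       | some v => some v
       | none => (PySem.List.index? prefs c).map (fun n : Nat => s + (n : Int))) := by
  induction prefs generalizing s d with
  | nil => cases h : d.get? c <;> simp [PySem.List.enumerate_nil, PySem.List.index?, h]
  | cons x xs ih =>
    rw [PySem.List.enumerate_cons, List.foldl_cons, ih]
    by_cases hx : c = x
    · subst hx
      rw [PySem.List.index?_cons_self]
      by_cases hc : d.contains c = true
      · have : (d.get? c).isSome := by rw [← PySem.Dict.contains_eq_isSome_get?]; exact hc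
        obtain ⟨v, hv⟩ := Option.isSome_iff_exists.mp this
        simp [hc, hv]
      · have hn : d.get? c = none := (PySem.Dict.get?_eq_none_iff_contains d c).mpr (by simpa using hc)
        rw [if_neg hc]
        simp [hn, PySem.Dict.get?_insert_self]
    · have hidx := PySem.List.index?_cons_of_ne (x := x) (v := c) xs (fun h => hx h.symm)
      rw [hidx]
      by_cases hc : d.contains x = true
      · rw [if_pos hc]
        cases h : d.get? c with
        | some v => simp
        | none =>
          simp only [Option.map_map]
          congr 1
          funext n
          simp [Function.comp]
          omega
      · rw [if_neg hc]
        have hg : (d.insert x s).get? c = d.get? c := PySem.Dict.get?_insert_of_ne d s hx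
        rw [hg]
        cases h : d.get? c with
        | some v => simp
        | none =>
          simp only [Option.map_map]
          congr 1
          funext n
          simp [Function.comp]
          omega

lemma pvPos_get? (prefs : List String) (c : String) :
    (pvPosIndex prefs).get? c = (PySem.List.index? prefs c).map (fun n : Nat => (n : Int)) := by
  rw [pvPosIndex, pvPos_get?_aux]
  simp [PySem.Dict.get?_empty]

lemma pvPos_contains (prefs : List String) (c : String) :
    (pvPosIndex prefs).contains c = decide (c ∈ prefs) := by
  rw [PySem.Dict.contains_eq_isSome_get?, pvPos_get?]
  by_cases h : c ∈ prefs
  · simp [h, Option.isSome_map]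
  · simp [h]

lemma pvFirstHit_none_iff (prefs : List String) (s : List String) :
    pvFirstHit prefs s = none ↔ ∀ c ∈ prefs, c ∉ s := by
  induction prefs with
  | nil => simp [pvFirstHit]
  | cons x xs ih => by_cases hx : x ∈ s <;> simp [pvFirstHit, hx, ih]

lemma pvFirstHit_some (prefs : List String) (s : List String) (c : String)
    (h : pvFirstHit prefs s = some c) :
    c ∈ s ∧ ∃ k, PySem.List.index? prefs c = some k ∧
      ∀ c' ∈ s, ∀ k', PySem.List.index? prefs c' = some k' → k ≤ k' := by
  induction prefs with
  | nil => simp [pvFirstHit] at h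
  | cons x xs ih =>
    by_cases hx : x ∈ s
    · simp [pvFirstHit, hx] at h
      subst h
      exact ⟨hx, 0, PySem.List.index?_cons_self _ _, fun _ _ _ _ => Nat.zero_le _⟩
    · simp [pvFirstHit, hx] at h
      obtain ⟨hc, k, hk, hmin⟩ := ih h
      have hcx : x ≠ c := fun he => hx (he ▸ hc)
      refine ⟨hc, k + 1, ?_, ?_⟩
      · rw [PySem.List.index?_cons_of_ne xs hcx, hk]; rfl
      · intro c' hc' k' hk'
        have hcx' : x ≠ c' := fun he => hx (he ▸ hc')
        rw [PySem.List.index?_cons_of_ne xs hcx'] at hk'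
        cases h0 : PySem.List.index? xs c' with
        | none => rw [h0] at hk'; simp at hk'
        | some k0 =>
          rw [h0] at hk'; simp at hk'
          have := hmin c' hc' k0 h0
          omega

-- B's minimal-position selection from cand computes A's first scan hit
lemma pvMin_eq_firstHit (prefs : List String) (cand : List String) :
    PySem.List.min? (cand.filter (fun c => (pvPosIndex prefs).contains c))
      (fun c => (pvPosIndex prefs).getD c 0) = pvFirstHit prefs cand := by
  cases h : pvFirstHit prefs cand with
  | none =>
    have hnone := (pvFirstHit_none_iff prefs cand).mp h
    have hfil : cand.filter (fun c => (pvPosIndex prefs).contains c) = [] := by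
      apply List.filter_eq_nil_iff.mpr
      intro c hc
      rw [pvPos_contains]
      simp only [decide_eq_true_eq]
      intro hmem
      exact hnone c hmem hc
    rw [hfil]
    exact (PySem.List.min?_eq_none_iff _ _).mpr rfl
  | some c =>
    obtain ⟨hc, k, hk, hmin⟩ := pvFirstHit_some prefs cand c h
    have hcp : c ∈ prefs := (PySem.List.index?_isSome_iff prefs c).mp (by rw [hk]; rfl)
    have hcf : c ∈ cand.filter (fun c => (pvPosIndex prefs).contains c) := by
      rw [List.mem_filter, pvPos_contains]; exact ⟨hc, by simpa using hcp⟩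
    cases hm : PySem.List.min? (cand.filter (fun c => (pvPosIndex prefs).contains c))
        (fun c => (pvPosIndex prefs).getD c 0) with
    | none =>
      exfalso
      have := (PySem.List.min?_eq_none_iff _ _).mp hm
      rw [this] at hcf
      simp at hcf
    | some m =>
      have hmmem := PySem.List.min?_mem hm
      rw [List.mem_filter, pvPos_contains] at hmmem
      obtain ⟨hmc, hmp⟩ := hmmem
      have hmp' : m ∈ prefs := by simpa using hmp
      obtain ⟨km, hkm⟩ := Option.isSome_iff_exists.mp ((PySem.List.index?_isSome_iff prefs m).mpr hmp')
      have hgm : (pvPosIndex prefs).getD m 0 = (km : Int) :=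
        PySem.Dict.getD_of_get?_eq_some _ 0 (by rw [pvPos_get?, hkm]; rfl)
      have hgc : (pvPosIndex prefs).getD c 0 = (k : Int) :=
        PySem.Dict.getD_of_get?_eq_some _ 0 (by rw [pvPos_get?, hk]; rfl)
      have hle : (pvPosIndex prefs).getD m 0 ≤ (pvPosIndex prefs).getD c 0 :=
        PySem.List.min?_isMin hm c hcf
      have h1 : km ≤ k := by rw [hgm, hgc] at hle; exact_mod_cast hle
      have h2 : k ≤ km := hmin m hmc km hkm
      have hkk : km = k := le_antisymm h1 h2
      subst hkk
      obtain ⟨hlt, hget, -⟩ := PySem.List.getElem_of_index?_eq_some hk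
      obtain ⟨hlt', hget', -⟩ := PySem.List.getElem_of_index?_eq_some hkm
      rw [← hget, hget']

-- min(cand) is the head of sorted(cand)
lemma pvMin_eq_sorted_head (cand : List String) :
    PySem.List.min? cand (fun c => c) = (PySem.List.sorted cand (fun x => x) false).head? := by
  rcases eq_or_ne cand [] with rfl | hne
  · rfl
  · cases hm : PySem.List.min? cand (fun c => c) with
    | none => exact absurd ((PySem.List.min?_eq_none_iff _ _).mp hm) hne
    | some m =>
      cases hs : PySem.List.sorted cand (fun x => x) false with
      | nil => exact absurd ((PySem.List.sorted_eq_nil_iff _ _ _).mp hs) hne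
      | cons h0 t0 =>
        have hh0 : h0 ∈ cand := by
          have : h0 ∈ PySem.List.sorted cand (fun x => x) false := by rw [hs]; simp
          exact (PySem.List.mem_sorted _ _ _ _).mp this
        have hmm : m ∈ cand := PySem.List.min?_mem hm
        have h1 : m ≤ h0 := PySem.List.min?_isMin hm h0 hh0
        have h2 : h0 ≤ m := PySem.List.key_head_sorted_le _ _ hs m hmm
        simp [le_antisymm h1 h2]

-- ===== VERDICT (by name: the statement is the Claim_ definition above) =====
theorem pick_lang_spec : Claim_equal_pick_lang := by
  intro prefs manual auto _
  unfold Spec_pick_lang pick_lang pick_lang_alt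
  rw [pvMin_eq_firstHit, pvMin_eq_firstHit, pvMin_eq_sorted_head, pvMin_eq_sorted_head]
  cases pvFirstHit prefs manual with
  | some c => rfl
  | none =>
    cases pvFirstHit prefs auto with
    | some c => rfl
    | none =>
      by_cases hm : manual = []
      · subst hm
        by_cases ha : auto = []
        · subst ha; rfl
        · obtain ⟨x, t, rfl⟩ := List.exists_cons_of_ne_nil ha
          simp only [ne_eq, not_true_eq_false, if_false, if_pos (by simp : (x :: t) ≠ [])]
          cases hs : (PySem.List.sorted (x :: t) (fun x => x) false).head? with
          | none =>
            exfalso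
            have := PySem.List.sorted_eq_nil_iff (x :: t) (fun x => x) false
            cases h' : PySem.List.sorted (x :: t) (fun x => x) false with
            | nil => simpa using this.mp h'
            | cons a b => rw [h'] at hs; simp at hs
          | some v => rfl
      · obtain ⟨x, t, rfl⟩ := List.exists_cons_of_ne_nil hm
        simp only [if_pos (by simp : (x :: t) ≠ [])]
        cases hs : (PySem.List.sorted (x :: t) (fun x => x) false).head? with
        | none =>
          exfalso
          have := PySem.List.sorted_eq_nil_iff (xs := x :: t) (key := fun x => x) (rev := false)
          cases h' : PySem.List.sorted (x :: t) (fun x => x) false with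
          | nil => simpa using this.mp h'
          | cons a b => rw [h'] at hs; simp at hs
        | some v => rfl
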